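-- pv_equiv track=rewrite | github.com/JOHRIVASU/BajajRo1 | main.py | alternating_caps_reverse
-- ===== SOURCE A (Python) =====
-- def alternating_caps_reverse(s: str) -> str:
--     s = s[::-1]
--     out, upper = [], True
--     for ch in s:
--         if ch.isalpha():
--             out.append(ch.upper() if upper else ch.lower())
--             upper = not upper
--         else:
--             out.append(ch)
--     return "".join(out)
-- ===== SOURCE B (Python) =====
-- def alternating_caps_reverse(s: str) -> str:
--     chars = list(reversed(s))
--     alpha_positions = [i for i, ch in enumerate(chars) if ch.isalpha()]
--     for rank, i in enumerate(alpha_positions):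
--         chars[i] = chars[i].upper() if rank % 2 == 0 else chars[i].lower()
--     return "".join(chars)
-- ===== Notes on version B (the rewrite author's own statement) =====
-- stated objective: alternative
-- what changed: Replaces A's single pass with an inline case toggle by a two-phase computation: first build an index table of alphabetic positions in the reversed string, then apply upper/lower case by the rank parity of each position, leaving other characters in place.
import Mathlib
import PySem

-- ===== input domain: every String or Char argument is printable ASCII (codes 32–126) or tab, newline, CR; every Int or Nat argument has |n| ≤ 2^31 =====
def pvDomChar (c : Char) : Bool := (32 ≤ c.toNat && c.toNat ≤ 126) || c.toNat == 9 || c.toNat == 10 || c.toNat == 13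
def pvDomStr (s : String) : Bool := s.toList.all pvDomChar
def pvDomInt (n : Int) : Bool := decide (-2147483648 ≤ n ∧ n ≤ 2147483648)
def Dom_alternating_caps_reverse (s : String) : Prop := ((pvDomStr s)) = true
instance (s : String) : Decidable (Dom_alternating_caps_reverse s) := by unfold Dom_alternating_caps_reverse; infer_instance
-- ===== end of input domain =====

-- B changes the decomposition (index table of alphabetic positions + rank-parity apply, instead of A's inline toggle pass); no speed claim.

-- ===== PORT A =====
-- the loop: out accumulator, toggle 'upper'
def pvALoop (l : List Char) (upper : Bool) (out : List Char) : List Char :=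
  match l with
  | [] => out
  | ch :: rest =>
    if PySem.Chars.isalpha ch then
      pvALoop rest (!upper) (out ++ [if upper then PySem.Chars.upperChar ch else PySem.Chars.lowerChar ch])
    else
      pvALoop rest upper (out ++ [ch])

def alternating_caps_reverse (s : String) : String :=
  -- s[::-1] is reversal (PySem.Str.slice?_none_none_neg_one)
  String.ofList (pvALoop s.toList.reverse true [])

-- ===== PORT B =====
-- the apply loop: for rank, i in enumerate(alpha_positions): chars[i] = upper/lower by rank parity
def pvBApply (ps : List (Int × Int)) (chars : List Char) : List Char :=
  ps.foldl (fun acc p =>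
    match acc[p.2.toNat]? with
    | some c =>
        acc.set p.2.toNat
          (if PySem.Int.mod p.1 2 == 0 then PySem.Chars.upperChar c else PySem.Chars.lowerChar c)
    | none => acc) chars

def alternating_caps_reverse_alt (s : String) : String :=
  let chars := s.toList.reverse
  let alphaPos := (PySem.List.enumerate chars 0).filterMap
    (fun p => if PySem.Chars.isalpha p.2 then some p.1 else none)
  String.ofList (pvBApply (PySem.List.enumerate alphaPos 0) chars)

-- ===== PRECONDITION & SPEC =====
def Spec_alternating_caps_reverse (s : String) (out : String) : Prop := out = alternating_caps_reverse_alt s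
instance (s : String) (out : String) : Decidable (Spec_alternating_caps_reverse s out) := by unfold Spec_alternating_caps_reverse; infer_instance

-- ===== CLAIM (what is proved, stated in full; the proofs are below) =====
def Claim_equal_alternating_caps_reverse : Prop := ∀ (s : String), Dom_alternating_caps_reverse s → Spec_alternating_caps_reverse s (alternating_caps_reverse s)

-- ===== LEMMAS AND PROOFS =====

-- common reference function: case each char by the running toggle
def pvCase (l : List Char) (u : Bool) : List Char :=
  match l with
  | [] => []
  | ch :: rest =>
    if PySem.Chars.isalpha ch then
      (if u then PySem.Chars.upperChar ch else PySem.Chars.lowerChar ch) :: pvCase rest (!u)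
    else ch :: pvCase rest u

-- alpha-position table starting at offset n
def pvPos (cs : List Char) (n : Int) : List Int :=
  (PySem.List.enumerate cs n).filterMap (fun p => if PySem.Chars.isalpha p.2 then some p.1 else none)

theorem pvALoop_eq (l : List Char) (u : Bool) (out : List Char) :
    pvALoop l u out = out ++ pvCase l u := by
  induction l generalizing u out with
  | nil => simp [pvALoop, pvCase]
  | cons ch rest ih =>
    by_cases h : PySem.Chars.isalpha ch = true <;>
      simp [pvALoop, pvCase, h, ih]

theorem pvPos_cons (ch : Char) (rest : List Char) (n : Int) :
    pvPos (ch :: rest) n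
      = (if PySem.Chars.isalpha ch then [n] else []) ++ pvPos rest (n + 1) := by
  by_cases h : PySem.Chars.isalpha ch = true <;>
    simp [pvPos, PySem.List.enumerate_cons, h]

theorem pvPos_shift (cs : List Char) (n : Int) :
    pvPos cs n = (pvPos cs 0).map (· + n) := by
  induction cs generalizing n with
  | nil => simp [pvPos, PySem.List.enumerate_nil]
  | cons ch rest ih =>
    rw [pvPos_cons, pvPos_cons, ih (n + 1), ih (0 + 1)]
    by_cases h : PySem.Chars.isalpha ch = true <;>
      simp [h, List.map_map, Function.comp_def] <;>
      · intro a _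
        omega

theorem pvPos_nonneg (cs : List Char) : ∀ x ∈ pvPos cs 0, 0 ≤ x := by
  induction cs with
  | nil => simp [pvPos, PySem.List.enumerate_nil]
  | cons ch rest ih =>
    intro x hx
    rw [pvPos_cons, pvPos_shift rest (0 + 1)] at hx
    by_cases h : PySem.Chars.isalpha ch = true <;> simp [h] at hx
    · rcases hx with rfl | ⟨y, hy, rfl⟩
      · rfl
      · have := ih y hy; omega
    · rcases hx with ⟨y, hy, rfl⟩
      have := ih y hy; omega

theorem pvBApply_cons (ps : List Int) (hps : ∀ x ∈ ps, 0 ≤ x) (r : Int) (ch : Char)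
    (rest : List Char) :
    pvBApply (PySem.List.enumerate (ps.map (· + 1)) r) (ch :: rest)
      = ch :: pvBApply (PySem.List.enumerate ps r) rest := by
  induction ps generalizing r ch rest with
  | nil => simp [pvBApply, PySem.List.enumerate_nil]
  | cons p ps ih =>
    have hp : 0 ≤ p := hps p (by simp)
    have htn : (p + 1).toNat = p.toNat + 1 := by omega
    simp only [List.map_cons, PySem.List.enumerate_cons, pvBApply, List.foldl_cons]
    cases hrp : rest[p.toNat]? with
    | none =>
      simp only [htn, List.getElem?_cons_succ, hrp]
      exact ih (fun x hx => hps x (by simp [hx])) (r+1) ch rest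
    | some c =>
      simp only [htn, List.getElem?_cons_succ, hrp, List.set_cons_succ]
      exact ih (fun x hx => hps x (by simp [hx])) (r+1) ch _

theorem pvParity (r : Int) :
    (PySem.Int.mod (r + 1) 2 == 0) = !(PySem.Int.mod r 2 == 0) := by
  rw [PySem.Int.mod_eq_emod_of_pos (by norm_num), PySem.Int.mod_eq_emod_of_pos (by norm_num)]
  rcases Int.emod_two_eq r with h | h
  · have h2 : (r + 1) % 2 = 1 := by omega
    simp [h, h2]
  · have h2 : (r + 1) % 2 = 0 := by omega
    simp [h, h2]

theorem pvBApply_eq (cs : List Char) (r : Int) :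
    pvBApply (PySem.List.enumerate (pvPos cs 0) r) cs
      = pvCase cs (PySem.Int.mod r 2 == 0) := by
  induction cs generalizing r with
  | nil => simp [pvBApply, pvPos, pvCase, PySem.List.enumerate_nil]
  | cons ch rest ih =>
    by_cases h : PySem.Chars.isalpha ch = true
    · have hpos : pvPos (ch :: rest) 0 = 0 :: (pvPos rest 0).map (· + 1) := by
        rw [pvPos_cons, pvPos_shift rest (0 + 1)]; simp [h]
      rw [hpos]
      simp only [PySem.List.enumerate_cons, pvBApply, List.foldl_cons]
      simp only [Int.toNat_zero, List.getElem?_cons_zero, List.set_cons_zero]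
      rw [show (List.foldl _ _ _ : List Char) = pvBApply (PySem.List.enumerate ((pvPos rest 0).map (· + 1)) (r+1)) (_ :: rest) from rfl]
      rw [pvBApply_cons (pvPos rest 0) (pvPos_nonneg rest) (r+1), ih (r+1), pvParity r]
      simp [pvCase, h]
    · have hpos : pvPos (ch :: rest) 0 = (pvPos rest 0).map (· + 1) := by
        rw [pvPos_cons, pvPos_shift rest (0 + 1)]; simp [h]
      rw [hpos, pvBApply_cons (pvPos rest 0) (pvPos_nonneg rest) r, ih r]
      simp [pvCase, h]

-- ===== VERDICT (by name: the statement is the Claim_ definition above) =====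
theorem alternating_caps_reverse_spec : Claim_equal_alternating_caps_reverse := by
  intro s _
  show alternating_caps_reverse s = alternating_caps_reverse_alt s
  unfold alternating_caps_reverse alternating_caps_reverse_alt
  rw [pvALoop_eq]
  show String.ofList ([] ++ pvCase s.toList.reverse true)
      = String.ofList (pvBApply (PySem.List.enumerate (pvPos s.toList.reverse 0) 0) s.toList.reverse)
  rw [pvBApply_eq s.toList.reverse 0]
  norm_num [show (PySem.Int.mod 0 2 == 0) = true from by decide]
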